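-- pv_equiv track=rewrite | github.com/ritvixdev/Paradox | Interview2.0/Python/Code/frequency_map_patterns_WITH_OUTPUT.py | same_frequency_in_two_strings
-- ===== SOURCE A (Python) =====
-- def same_frequency_in_two_strings(a, b):
--     """Return True if both strings have identical character frequencies."""
--     if len(a) != len(b):
--         return False
--
--     freq = {}
--     for ch in a:
--         freq[ch] = freq.get(ch, 0) + 1
--
--     for ch in b:
--         if ch not in freq or freq[ch] == 0:
--             return False
--         freq[ch] -= 1
--
--     return True
-- ===== SOURCE B (Python) =====
-- def same_frequency_in_two_strings(a, b):
--     """Return True if both strings have identical character frequencies."""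
--     return sorted(a) == sorted(b)
-- ===== Notes on version B (the rewrite author's own statement) =====
-- stated objective: simpler
-- what changed: Replaces the build/decrement frequency-dict two-pass check with a one-line sort-and-compare: sorted(a) == sorted(b), which subsumes the length guard.
import Mathlib
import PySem

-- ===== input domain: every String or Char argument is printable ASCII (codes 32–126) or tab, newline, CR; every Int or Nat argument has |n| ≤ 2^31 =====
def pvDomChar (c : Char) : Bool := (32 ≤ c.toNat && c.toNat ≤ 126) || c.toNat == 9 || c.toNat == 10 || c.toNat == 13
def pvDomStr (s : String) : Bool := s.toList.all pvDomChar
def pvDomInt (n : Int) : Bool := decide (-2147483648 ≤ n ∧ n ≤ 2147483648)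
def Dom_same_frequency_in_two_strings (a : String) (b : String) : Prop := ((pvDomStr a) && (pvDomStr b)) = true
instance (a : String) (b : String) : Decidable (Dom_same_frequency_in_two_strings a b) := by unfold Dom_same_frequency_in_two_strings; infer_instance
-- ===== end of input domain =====

-- B replaces A's build-then-decrement frequency dict with a one-line sort-and-compare (simpler; subsumes the length guard).

-- ===== PORT A =====
-- the second for-loop of A, with its early 'return False'
def pvFreqLoop (l : List Char) (freq : PySem.Dict Char Int) : Bool :=
  match l with
  | [] => true
  | ch :: rest =>
    if !(freq.contains ch) || freq.getD ch 0 == 0 then false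
    else pvFreqLoop rest (freq.insert ch (freq.getD ch 0 - 1))

def same_frequency_in_two_strings (a : String) (b : String) : Bool :=
  if PySem.Str.len a ≠ PySem.Str.len b then false
  else pvFreqLoop b.toList (a.toList.foldl (fun d ch => d.insert ch (d.getD ch 0 + 1)) PySem.Dict.empty)

-- ===== PORT B =====
def same_frequency_in_two_strings_alt (a : String) (b : String) : Bool :=
  PySem.List.sorted a.toList (fun x => x) false == PySem.List.sorted b.toList (fun x => x) false

-- ===== PRECONDITION & SPEC =====
def Spec_same_frequency_in_two_strings (a : String) (b : String) (out : Bool) : Prop := out = same_frequency_in_two_strings_alt a b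
instance (a : String) (b : String) (out : Bool) : Decidable (Spec_same_frequency_in_two_strings a b out) := by unfold Spec_same_frequency_in_two_strings; infer_instance

-- ===== CLAIM (what is proved, stated in full; the proofs are below) =====
def Claim_equal_same_frequency_in_two_strings : Prop := ∀ (a : String) (b : String), Dom_same_frequency_in_two_strings a b → Spec_same_frequency_in_two_strings a b (same_frequency_in_two_strings a b)

-- ===== LEMMAS AND PROOFS =====

-- A's decrement loop succeeds iff every character's count in l is within the dict's budget
lemma pvFreqLoop_iff (l : List Char) (freq : PySem.Dict Char Int)
    (hnn : ∀ c, 0 ≤ freq.getD c 0) :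
    pvFreqLoop l freq = true ↔ ∀ c, (l.count c : Int) ≤ freq.getD c 0 := by
  induction l generalizing freq with
  | nil => simpa [pvFreqLoop] using hnn
  | cons ch rest ih =>
    by_cases h : freq.getD ch 0 = 0
    · have hfalse : pvFreqLoop (ch :: rest) freq = false := by
        simp [pvFreqLoop, h]
      rw [hfalse]
      simp only [Bool.false_eq_true, false_iff, not_forall]
      refine ⟨ch, ?_⟩
      rw [List.count_cons_self, h]
      push_cast
      omega
    · have hcont : freq.contains ch = true := by
        by_contra hc
        exact h (PySem.Dict.getD_of_not_contains freq 0 (by simpa using hc))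
      have hstep : pvFreqLoop (ch :: rest) freq
          = pvFreqLoop rest (freq.insert ch (freq.getD ch 0 - 1)) := by
        simp [pvFreqLoop, hcont, h]
      rw [hstep, ih _ (by
        intro c
        rw [PySem.Dict.getD_insert]
        split_ifs with hc
        · have := hnn ch; omega
        · exact hnn c)]
      constructor
      · intro hall c
        have h2 := hall c
        rw [PySem.Dict.getD_insert] at h2
        by_cases hc : c = ch
        · subst hc
          rw [if_pos rfl] at h2
          rw [List.count_cons_self]
          push_cast at h2 ⊢
          omega
        · rw [if_neg hc] at h2
          simpa [List.count_cons, Ne.symm hc] using h2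
      · intro hall c
        have h2 := hall c
        rw [PySem.Dict.getD_insert]
        by_cases hc : c = ch
        · subst hc
          rw [if_pos rfl]
          rw [List.count_cons_self] at h2
          push_cast at h2 ⊢
          omega
        · rw [if_neg hc]
          simpa [List.count_cons, Ne.symm hc] using h2

lemma pv_A_iff_perm (a b : String) :
    same_frequency_in_two_strings a b = true ↔ a.toList.Perm b.toList := by
  unfold same_frequency_in_two_strings
  have hcnt : ∀ c, (a.toList.foldl (fun d ch => d.insert ch (d.getD ch 0 + 1)) PySem.Dict.empty).getD c 0
      = (a.toList.count c : Int) := by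
    intro c
    rw [PySem.Dict.getD_foldl_insert_add_one]
    simp [PySem.Dict.getD_empty]
  by_cases hlen : PySem.Str.len a = PySem.Str.len b
  · have hlen' : a.toList.length = b.toList.length := by
      have h := hlen
      simp only [PySem.Str.len_eq] at h
      exact_mod_cast h
    rw [if_neg (not_ne_iff.mpr hlen)]
    rw [pvFreqLoop_iff _ _ (by intro c; rw [hcnt]; positivity)]
    constructor
    · intro hall
      -- counts of b ≤ counts of a and equal lengths ⇒ permutation
      have hle : (↑b.toList : Multiset Char) ≤ (↑a.toList : Multiset Char) := by
        rw [Multiset.le_iff_count]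
        intro c
        have h2 := hall c
        rw [hcnt] at h2
        simpa using h2
      have hcard : Multiset.card (↑a.toList : Multiset Char) ≤ Multiset.card (↑b.toList : Multiset Char) := by
        simpa using hlen'.le
      have heq := Multiset.eq_of_le_of_card_le hle hcard
      exact ((Multiset.coe_eq_coe).mp heq).symm
    · intro hperm c
      rw [hcnt]
      exact_mod_cast (hperm.count_eq c).ge
  · rw [if_pos hlen]
    simp only [Bool.false_eq_true, false_iff]
    intro hperm
    exact hlen (by simp [PySem.Str.len_eq, hperm.length_eq])

lemma pv_B_iff_perm (a b : String) :
    same_frequency_in_two_strings_alt a b = true ↔ a.toList.Perm b.toList := by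
  unfold same_frequency_in_two_strings_alt
  rw [beq_iff_eq]
  exact PySem.List.sorted_id_eq_sorted_id_iff_perm (xs := a.toList) (ys := b.toList)

-- ===== VERDICT (by name: the statement is the Claim_ definition above) =====
theorem same_frequency_in_two_strings_spec : Claim_equal_same_frequency_in_two_strings := by
  intro a b _
  unfold Spec_same_frequency_in_two_strings
  exact Bool.eq_iff_iff.mpr ((pv_A_iff_perm a b).trans (pv_B_iff_perm a b).symm)
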